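-- pv_equiv track=rewrite | github.com/eduardoconekta/code-challenges | code-jam/qualification/universe/solution.py | getDamageWithoutSwap
-- ===== SOURCE A (Python) =====
-- def getDamageWithoutSwap(damage, p):
--     strenght = 1
--     for j in p:
--         if j == 'C':
--             strenght = strenght * 2
--         if j == 'S':
--            damage = damage - strenght
--     return damage
-- ===== SOURCE B (Python) =====
-- def getDamageWithoutSwap(damage, p):
--     # Two-pass: build prefix-count-of-'C' table, then subtract sum of 2**k over 'S' positions.
--     prefixC = []
--     c = 0
--     for j in p:
--         prefixC.append(c)
--         if j == 'C':
--             c += 1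
--     total = sum(2 ** k for j, k in zip(p, prefixC) if j == 'S')
--     return damage - total
-- ===== Notes on version B (the rewrite author's own statement) =====
-- stated objective: alternative
-- what changed: Replaces the live doubling 'strenght' accumulator with a two-pass scheme: first build a prefix table of C-counts, then subtract the sum of 2**count over the S positions.
import Mathlib
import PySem

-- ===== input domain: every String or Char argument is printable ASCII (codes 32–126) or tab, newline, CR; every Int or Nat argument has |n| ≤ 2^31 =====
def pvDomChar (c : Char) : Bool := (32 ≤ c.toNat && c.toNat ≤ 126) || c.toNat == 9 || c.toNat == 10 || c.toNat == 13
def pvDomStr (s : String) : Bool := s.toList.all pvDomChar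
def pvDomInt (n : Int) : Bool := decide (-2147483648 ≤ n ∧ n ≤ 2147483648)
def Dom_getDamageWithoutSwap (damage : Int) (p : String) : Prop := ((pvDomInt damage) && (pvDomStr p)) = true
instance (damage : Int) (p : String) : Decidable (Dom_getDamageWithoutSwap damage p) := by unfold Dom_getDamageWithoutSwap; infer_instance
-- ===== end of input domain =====

-- B replaces A's live doubling accumulator with a two-pass prefix-C-count table plus summed subtraction (alternative decomposition, same cost).


-- ===== PORT A =====
-- A's loop: strenght doubles on 'C', damage decreases by strenght on 'S'.
def aLoop : List Char → Int → Int → Int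
  | [], _, damage => damage
  | j :: t, strenght, damage =>
      let s' := if j = 'C' then strenght * 2 else strenght
      let d' := if j = 'S' then damage - s' else damage
      aLoop t s' d'

def getDamageWithoutSwap (damage : Int) (p : String) : Int :=
  aLoop p.toList 1 damage

-- ===== PORT B =====
-- first pass: prefix table of C-counts
def buildPrefix : List Char → Nat → List Nat
  | [], _ => []
  | j :: t, c => c :: buildPrefix t (if j = 'C' then c + 1 else c)

def getDamageWithoutSwap_alt (damage : Int) (p : String) : Int :=
  let prefixC := buildPrefix p.toList 0
  let total : Int := (p.toList.zip prefixC).foldl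
    (fun acc jk => if jk.1 = 'S' then acc + 2 ^ jk.2 else acc) 0
  damage - total

-- ===== PRECONDITION & SPEC =====
def Spec_getDamageWithoutSwap (damage : Int) (p : String) (out : Int) : Prop := out = getDamageWithoutSwap_alt damage p
instance (damage : Int) (p : String) (out : Int) : Decidable (Spec_getDamageWithoutSwap damage p out) := by unfold Spec_getDamageWithoutSwap; infer_instance

-- ===== CLAIM (what is proved, stated in full; the proofs are below) =====
def Claim_equal_getDamageWithoutSwap : Prop := ∀ (damage : Int) (p : String), Dom_getDamageWithoutSwap damage p → Spec_getDamageWithoutSwap damage p (getDamageWithoutSwap damage p)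

-- ===== LEMMAS AND PROOFS =====
def bSum (l : List Char) (c : Nat) : Int :=
  (l.zip (buildPrefix l c)).foldl (fun acc jk => if jk.1 = 'S' then acc + 2 ^ jk.2 else acc) 0

theorem foldl_acc (pairs : List (Char × Nat)) (acc : Int) :
    pairs.foldl (fun a jk => if jk.1 = 'S' then a + 2 ^ jk.2 else a) acc
      = acc + pairs.foldl (fun a jk => if jk.1 = 'S' then a + 2 ^ jk.2 else a) 0 := by
  induction pairs generalizing acc with
  | nil => simp
  | cons h t ih =>
      simp only [List.foldl_cons]
      rw [ih, ih (if h.1 = 'S' then 0 + 2 ^ h.2 else 0)]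
      split_ifs <;> ring

theorem bSum_cons (j : Char) (t : List Char) (c : Nat) :
    bSum (j :: t) c
      = (if j = 'S' then (2 : Int) ^ c else 0) + bSum t (if j = 'C' then c + 1 else c) := by
  simp only [bSum, buildPrefix, List.zip_cons_cons, List.foldl_cons]
  rw [foldl_acc]
  split_ifs <;> simp

theorem aLoop_eq (l : List Char) (c : Nat) (d : Int) :
    aLoop l (2 ^ c) d = d - bSum l c := by
  induction l generalizing c d with
  | nil => simp [aLoop, bSum]
  | cons j t ih =>
      simp only [aLoop, bSum_cons]
      by_cases hc : j = 'C'
      · have hs : j ≠ 'S' := by simp [hc]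
        have : (2 : Int) ^ c * 2 = 2 ^ (c + 1) := by ring
        simp only [hc, hs, if_true, if_false, if_neg hs, this]
        rw [ih]
        simp
      · by_cases hs : j = 'S'
        · simp only [if_neg hc, if_pos hs]
          rw [ih]
          ring
        · simp only [if_neg hc, if_neg hs]
          rw [ih]
          simp

-- ===== VERDICT (by name: the statement is the Claim_ definition above) =====
theorem getDamageWithoutSwap_spec : Claim_equal_getDamageWithoutSwap := by
  intro damage p _
  show _ = _
  unfold getDamageWithoutSwap getDamageWithoutSwap_alt
  have := aLoop_eq p.toList 0 damage
  simpa [bSum] using this
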